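-- pv_equiv track=rewrite | github.com/PeppaYao/shepherding-problem | knn_awareness/shepherdR.py | get_green_proportion
-- ===== SOURCE A (Python) =====
-- def get_green_proportion(all_sheep, green_index):
--     """
--     :param all_sheep: all sheep postion
--     :param green_index: green sheep index
--     :return: proportion of green sheep in target area
--     """
--     green_count = 0
--     other_count = 0
--     n = len(all_sheep)
--     for i in range(n):
--         sheep = all_sheep[i]
--         if sheep[0] >= 455 and sheep[1] >= 455:
--             if i in green_index:
--                 green_count += 1
--             else:
--                 other_count += 1
--
--     return green_count, other_count
-- ===== SOURCE B (Python) =====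
-- def get_green_proportion(all_sheep, green_index):
--     # Pass 1: count all sheep inside the target region.
--     total = sum(1 for s in all_sheep if s[0] >= 455 and s[1] >= 455)
--     # Pass 2: iterate the (distinct) green indices themselves, counting those
--     # that point at an in-region sheep; the rest of the region is "other".
--     n = len(all_sheep)
--     green = sum(1 for g in set(green_index)
--                 if 0 <= g < n and all_sheep[g][0] >= 455 and all_sheep[g][1] >= 455)
--     return green, total - green
-- ===== Notes on version B (the rewrite author's own statement) =====
-- stated objective: faster
-- what changed: Instead of one indexed loop over the sheep with an inner membership scan of green_index per in-region sheep, B makes two independent counting passes: one over the sheep for the region total, and one over the distinct green indices checking whether each points at an in-region sheep; other = total - green, so the inner scan disappears.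
import Mathlib
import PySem

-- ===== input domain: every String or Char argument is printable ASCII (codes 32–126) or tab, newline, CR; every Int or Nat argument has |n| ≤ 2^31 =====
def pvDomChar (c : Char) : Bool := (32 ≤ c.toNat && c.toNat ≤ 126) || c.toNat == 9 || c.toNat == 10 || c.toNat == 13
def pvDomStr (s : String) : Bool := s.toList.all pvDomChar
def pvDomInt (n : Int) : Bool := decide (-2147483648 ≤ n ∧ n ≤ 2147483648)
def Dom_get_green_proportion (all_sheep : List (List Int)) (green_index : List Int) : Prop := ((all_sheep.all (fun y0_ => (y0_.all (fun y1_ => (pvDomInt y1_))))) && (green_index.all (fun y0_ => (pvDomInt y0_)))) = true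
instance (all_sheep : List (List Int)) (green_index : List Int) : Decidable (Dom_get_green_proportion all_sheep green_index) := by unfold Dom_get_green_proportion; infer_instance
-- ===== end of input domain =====

-- B replaces A's indexed loop with an inner membership scan by two independent counting
-- passes (region total over the sheep; green over the distinct green indices), other =
-- total - green (objective: faster, the inner scan over green_index disappears).

-- ===== PORT A =====
-- literal port of A's indexed loop; pyGetD's defaults are never reached under Pre_
def get_green_proportion (all_sheep : List (List Int)) (green_index : List Int) : Int × Int :=
  (PySem.List.pyRange 0 (PySem.List.len all_sheep) 1).foldl
    (fun (acc : Int × Int) i =>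
      let sheep := PySem.List.pyGetD all_sheep i ([] : List Int)
      if 455 ≤ PySem.List.pyGetD sheep 0 0 ∧ 455 ≤ PySem.List.pyGetD sheep 1 0 then
        if i ∈ green_index then (acc.1 + 1, acc.2) else (acc.1, acc.2 + 1)
      else acc)
    (0, 0)

-- ===== PORT B =====
-- port of Source B: sum(1 for … if p) is ported as (… .filter p).length
def get_green_proportion_alt (all_sheep : List (List Int)) (green_index : List Int) : Int × Int :=
  let total : Int :=
    ((all_sheep.filter (fun s =>
        decide (455 ≤ PySem.List.pyGetD s 0 0) && decide (455 ≤ PySem.List.pyGetD s 1 0))).length : Int)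
  let n : Int := PySem.List.len all_sheep
  let green : Int :=
    (((PySem.Set.ofList green_index).filter (fun g =>
        decide (0 ≤ g) && decide (g < n) &&
        (decide (455 ≤ PySem.List.pyGetD (PySem.List.pyGetD all_sheep g ([] : List Int)) 0 0) &&
         decide (455 ≤ PySem.List.pyGetD (PySem.List.pyGetD all_sheep g ([] : List Int)) 1 0)))).length : Int)
  (green, total - green)

-- ===== PRECONDITION & SPEC =====
-- Pre_ excludes exactly the inputs on which A raises IndexError: a sheep that is []
-- (sheep[0] fails) or a singleton whose first coordinate is ≥ 455 (sheep[1] fails).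
def Pre_get_green_proportion (all_sheep : List (List Int)) (green_index : List Int) : Prop :=
  ∀ s ∈ all_sheep, s ≠ [] ∧ (455 ≤ s.headI → 2 ≤ s.length)
instance (all_sheep : List (List Int)) (green_index : List Int) : Decidable (Pre_get_green_proportion all_sheep green_index) := by unfold Pre_get_green_proportion; infer_instance

def pvWitness_get_green_proportion : List (List Int) × List Int := ([[455, 500], [0, 0], [500, 455]], [2, 5])

def Spec_get_green_proportion (all_sheep : List (List Int)) (green_index : List Int) (out : Int × Int) : Prop := out = get_green_proportion_alt all_sheep green_index
instance (all_sheep : List (List Int)) (green_index : List Int) (out : Int × Int) : Decidable (Spec_get_green_proportion all_sheep green_index out) := by unfold Spec_get_green_proportion; infer_instance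

-- ===== CLAIM (what is proved, stated in full; the proofs are below) =====
def Claim_equal_get_green_proportion : Prop := ∀ (all_sheep : List (List Int)) (green_index : List Int), Dom_get_green_proportion all_sheep green_index → Pre_get_green_proportion all_sheep green_index → Spec_get_green_proportion all_sheep green_index (get_green_proportion all_sheep green_index)

-- ===== LEMMAS AND PROOFS =====

-- the region predicate A branches on, as a function of the index
def pvP (all_sheep : List (List Int)) (i : Int) : Bool :=
  decide (455 ≤ PySem.List.pyGetD (PySem.List.pyGetD all_sheep i ([] : List Int)) 0 0 ∧
          455 ≤ PySem.List.pyGetD (PySem.List.pyGetD all_sheep i ([] : List Int)) 1 0)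

-- A's fold counts, over any index list, region∧green and region∧¬green
lemma foldA_eq (all_sheep : List (List Int)) (green_index : List Int)
    (l : List Int) (a b : Int) :
    l.foldl
      (fun (acc : Int × Int) i =>
        let sheep := PySem.List.pyGetD all_sheep i ([] : List Int)
        if 455 ≤ PySem.List.pyGetD sheep 0 0 ∧ 455 ≤ PySem.List.pyGetD sheep 1 0 then
          if i ∈ green_index then (acc.1 + 1, acc.2) else (acc.1, acc.2 + 1)
        else acc)
      (a, b)
    = (a + ((l.filter (pvP all_sheep)).filter (fun i => decide (i ∈ green_index))).length,
       b + ((l.filter (pvP all_sheep)).filter (fun i => !decide (i ∈ green_index))).length) := by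
  induction l generalizing a b with
  | nil => simp
  | cons x xs ih =>
    simp only [List.foldl_cons, List.filter_cons]
    by_cases hp : 455 ≤ PySem.List.pyGetD (PySem.List.pyGetD all_sheep x ([] : List Int)) 0 0 ∧
        455 ≤ PySem.List.pyGetD (PySem.List.pyGetD all_sheep x ([] : List Int)) 1 0
    · by_cases hg : x ∈ green_index <;>
        simp [hp, hg, pvP, ih] <;> push_cast <;> ring
    · simp [hp, pvP, ih]

-- A's green list and B's green list are permutations (both nodup, same membership)
lemma green_lists_perm (all_sheep : List (List Int)) (green_index : List Int) :
    List.Perm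
      (((PySem.List.pyRange 0 (PySem.List.len all_sheep) 1).filter (pvP all_sheep)).filter
        (fun i => decide (i ∈ green_index)))
      ((PySem.Set.ofList green_index).filter (fun g =>
        decide (0 ≤ g) && decide (g < PySem.List.len all_sheep) &&
        (decide (455 ≤ PySem.List.pyGetD (PySem.List.pyGetD all_sheep g ([] : List Int)) 0 0) &&
         decide (455 ≤ PySem.List.pyGetD (PySem.List.pyGetD all_sheep g ([] : List Int)) 1 0)))) := by
  rw [List.perm_ext_iff_of_nodup]
  · intro x
    simp [pvP, PySem.List.mem_pyRange_one, PySem.Set.mem_ofList]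
    tauto
  · exact ((PySem.List.nodup_pyRange_one _ _).filter _).filter _
  · exact (PySem.Set.nodup_ofList _).filter _

-- the region count over indices equals the direct filter count over the sheep
lemma region_count_eq (all_sheep : List (List Int)) :
    ((PySem.List.pyRange 0 (PySem.List.len all_sheep) 1).filter (pvP all_sheep)).length
    = (all_sheep.filter (fun s =>
        decide (455 ≤ PySem.List.pyGetD s 0 0) && decide (455 ≤ PySem.List.pyGetD s 1 0))).length := by
  have h := PySem.List.map_pyGetD_pyRange_zero all_sheep ([] : List Int)
  calc ((PySem.List.pyRange 0 (PySem.List.len all_sheep) 1).filter (pvP all_sheep)).length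
      = (((PySem.List.pyRange 0 (PySem.List.len all_sheep) 1).map
            (fun j => PySem.List.pyGetD all_sheep j ([] : List Int))).filter
          (fun s => decide (455 ≤ PySem.List.pyGetD s 0 0) &&
                    decide (455 ≤ PySem.List.pyGetD s 1 0))).length := by
        rw [List.filter_map, List.length_map]
        congr 1
        apply List.filter_congr
        intro i _
        simp [pvP, Function.comp]
    _ = _ := by rw [h]

theorem get_green_proportion_spec : Claim_equal_get_green_proportion := by
  intro all_sheep green_index _hDom _hPre
  unfold Spec_get_green_proportion get_green_proportion get_green_proportion_alt
  simp only []
  rw [foldA_eq]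
  have hg := (green_lists_perm all_sheep green_index).length_eq
  have hsplit := List.length_eq_length_filter_add
    (l := (PySem.List.pyRange 0 (PySem.List.len all_sheep) 1).filter (pvP all_sheep))
    (f := fun i => decide (i ∈ green_index))
  have hr := region_count_eq all_sheep
  refine Prod.ext ?_ ?_ <;> simp only [] <;> push_cast <;> omega

-- A's raises (empty/short sheep) are exactly outside Pre_, so nothing else is excluded.
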